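-- pv_equiv track=rewrite | github.com/black-vect0r/generalised_rag_v2 | rag/sqlite_store.py | _guess_index_cols
-- ===== SOURCE A (Python) =====
-- from typing import List, Tuple
--
-- def _guess_index_cols(cols: List[str]) -> List[str]:
--     """
--     Heuristic indexes for speed (optional but helps demos).
--     """
--     candidates = []
--     lowered = [c.lower() for c in cols]
--     for key in ["date", "time", "symbol", "scrip", "isin", "client", "trader", "member", "id", "order", "trade"]:
--         for i, c in enumerate(lowered):
--             if key in c and cols[i] not in candidates:
--                 candidates.append(cols[i])
--     return candidates[:3]  # keep it small
-- ===== SOURCE B (Python) =====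
-- _KEYS = ["date", "time", "symbol", "scrip", "isin", "client", "trader", "member", "id", "order", "trade"]
--
-- def _guess_index_cols(cols):
--     """
--     Heuristic indexes for speed (optional but helps demos).
--     """
--     recs = []
--     for pos, col in enumerate(cols):
--         low = col.lower()
--         for rank, key in enumerate(_KEYS):
--             if key in low:
--                 recs.append((rank, pos, col))
--                 break
--     recs.sort(key=lambda t: (t[0], t[1]))
--     out = []
--     for _, _, col in recs:
--         if col not in out:
--             out.append(col)
--     return out[:3]
-- ===== Notes on version B (the rewrite author's own statement) =====
-- stated objective: alternative
-- what changed: Replaces the key-major nested rescans with a single pass over the columns that records (first-matching-key rank, position, column) with an early break, then a stable sort by (rank, position) and one dedup-by-value walk taking the first 3.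
import Mathlib
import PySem

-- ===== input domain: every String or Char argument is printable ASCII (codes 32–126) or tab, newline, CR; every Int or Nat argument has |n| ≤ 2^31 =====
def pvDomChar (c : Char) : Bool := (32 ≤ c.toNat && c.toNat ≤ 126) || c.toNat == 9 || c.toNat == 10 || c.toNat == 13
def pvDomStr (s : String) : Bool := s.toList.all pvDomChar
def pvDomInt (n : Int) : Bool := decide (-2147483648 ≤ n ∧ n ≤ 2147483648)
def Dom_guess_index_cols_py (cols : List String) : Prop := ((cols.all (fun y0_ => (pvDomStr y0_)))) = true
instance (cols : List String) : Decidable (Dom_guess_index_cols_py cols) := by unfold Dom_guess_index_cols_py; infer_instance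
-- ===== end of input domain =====

-- B replaces A's key-major nested rescans by one pass recording (first-matching-key rank, position, column)
-- per column, a stable sort by (rank, position), and a single dedup walk: a different algorithm, similar cost.

-- ===== PORT A =====
def pvKeys : List String := ["date", "time", "symbol", "scrip", "isin", "client", "trader", "member", "id", "order", "trade"]

def guess_index_cols_py (cols : List String) : List String :=
  let lowered := cols.map (fun c => PySem.Str.lower c)
  -- cols[i] with i a valid enumerate index: PySem.List.pyGetD is exact here; candidates[:3] = take 3
  let candidates := pvKeys.foldl (fun candidates key =>
    (PySem.List.enumerate lowered).foldl (fun candidates ic =>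
      if PySem.Str.isIn key ic.2 && !(candidates.contains (PySem.List.pyGetD cols ic.1 "")) then
        candidates ++ [PySem.List.pyGetD cols ic.1 ""]
      else candidates) candidates) []
  candidates.take 3

-- ===== PORT B =====
-- inner 'for rank, key in enumerate(_KEYS): if key in low: …; break' = first hit of findSome?
def pvRank (low : String) : Option Int :=
  (PySem.List.enumerate pvKeys).findSome? (fun rk => if PySem.Str.isIn rk.2 low then some rk.1 else none)

def guess_index_cols_py_alt (cols : List String) : List String :=
  let recs := (PySem.List.enumerate cols).foldl (fun recs pc =>
    match pvRank (PySem.Str.lower pc.2) with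
    | some r => recs ++ [(r, pc.1, pc.2)]
    | none => recs) ([] : List (Int × Int × String))
  let recsS := PySem.List.sorted2 recs (fun t => t.1) (fun t => t.2.1)
  let out := recsS.foldl (fun out t => if out.contains t.2.2 then out else out ++ [t.2.2]) []
  out.take 3

-- ===== PRECONDITION & SPEC =====
def Spec_guess_index_cols_py (cols : List String) (out : List String) : Prop := out = guess_index_cols_py_alt cols
instance (cols : List String) (out : List String) : Decidable (Spec_guess_index_cols_py cols out) := by unfold Spec_guess_index_cols_py; infer_instance

-- ===== CLAIM (what is proved, stated in full; the proofs are below) =====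
def Claim_equal_guess_index_cols_py : Prop := ∀ (cols : List String), Dom_guess_index_cols_py cols → Spec_guess_index_cols_py cols (guess_index_cols_py cols)

-- ===== LEMMAS AND PROOFS =====

-- proof-side abbreviations
def pvEC (cols : List String) : List (Int × String) := PySem.List.enumerate cols
def pvDS (cand : List String) (vs : List String) : List String :=
  vs.foldl (fun c v => if c.contains v then c else c ++ [v]) cand
def pvToRec (ic : Int × String) : Option (Int × Int × String) :=
  (pvRank (PySem.Str.lower ic.2)).map (fun r => (r, ic.1, ic.2))
def pvRecs (cols : List String) : List (Int × Int × String) := (pvEC cols).filterMap pvToRec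
def pvMatch (key : String) (ic : Int × String) : Bool := PySem.Str.isIn key (PySem.Str.lower ic.2)
def pvSegA (cols : List String) (key : String) : List String :=
  ((pvEC cols).filter (pvMatch key)).map (·.2)
def pvSegB (cols : List String) (j : Int) : List String :=
  ((pvRecs cols).filter (fun t => t.1 == j)).map (·.2.2)
def pvR (cols : List String) : List (Int × Int × String) :=
  (PySem.List.enumerate pvKeys).flatMap (fun jk => (pvRecs cols).filter (fun t => t.1 == jk.1))

-- dedup-accumulator basics
theorem pvDS_append (cand v1 v2 : List String) : pvDS cand (v1 ++ v2) = pvDS (pvDS cand v1) v2 := by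
  simp [pvDS, List.foldl_append]

theorem pvDS_mono (vs : List String) : ∀ (cand : List String) (v : String),
    cand.contains v = true → (pvDS cand vs).contains v = true := by
  induction vs with
  | nil => intro cand v h; simpa [pvDS] using h
  | cons x xs ih =>
    intro cand v h
    simp only [pvDS, List.foldl_cons] at *
    apply ih
    simp at h ⊢
    split_ifs <;> simp [h]
theorem pvDS_mem (vs : List String) : ∀ (cand : List String) (v : String),
    v ∈ vs → (pvDS cand vs).contains v = true := by
  induction vs with
  | nil => simp
  | cons x xs ih =>
    intro cand v hv
    simp only [pvDS, List.foldl_cons]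
    rcases List.mem_cons.mp hv with rfl | hv
    · apply pvDS_mono
      simp
      split_ifs with hx <;> simp [hx]
    · exact ih _ v hv
theorem pvDS_skip (l : List (Int × String)) : ∀ (p : Int × String → Bool) (cand : List String),
    (∀ ic ∈ l, p ic = false → cand.contains ic.2 = true) →
    pvDS cand (l.map (·.2)) = pvDS cand ((l.filter p).map (·.2)) := by
  induction l with
  | nil => simp
  | cons ic l ih =>
    intro p cand h
    by_cases hp : p ic = true
    · simp only [List.map_cons, List.filter_cons, hp, if_pos, pvDS, List.foldl_cons]
      apply ih
      intro jc hjc hpjc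
      have h2 := h jc (List.mem_cons_of_mem _ hjc) hpjc
      simp at h2 ⊢
      split_ifs <;> simp [h2]
    · have hp' : p ic = false := by simpa using hp
      have hc : cand.contains ic.2 = true := h ic (List.mem_cons_self) hp'
      simp only [List.map_cons, List.filter_cons, hp', pvDS, List.foldl_cons, Bool.false_eq_true,
        if_false]
      rw [if_pos hc]
      exact ih p cand (fun jc hjc => h jc (List.mem_cons_of_mem _ hjc))
-- enumerate facts
theorem pvEnum_map {α β : Type} (l : List α) (f : α → β) : ∀ (s : Int),
    PySem.List.enumerate (l.map f) s = (PySem.List.enumerate l s).map (fun p => (p.1, f p.2)) := by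
  induction l with
  | nil => simp [PySem.List.enumerate_nil]
  | cons x xs ih => intro s; simp [PySem.List.enumerate_cons, ih]
theorem pvEnum_fst_inj {α : Type} (K : List α) (s j : Int) (a b : α)
    (ha : (j, a) ∈ PySem.List.enumerate K s) (hb : (j, b) ∈ PySem.List.enumerate K s) : a = b := by
  rw [PySem.List.mem_enumerate_iff] at ha hb
  obtain ⟨k, hk, hka⟩ := ha
  obtain ⟨k', hk', hkb⟩ := hb
  have h1 : j = s + (k : Int) ∧ a = K[k] := by simpa [Prod.ext_iff] using hka
  have h2 : j = s + (k' : Int) ∧ b = K[k'] := by simpa [Prod.ext_iff] using hkb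
  have : k = k' := by omega
  subst this
  rw [h1.2, h2.2]
-- first-hit (findSome?) facts
theorem pvFs_sound (K : List String) : ∀ (s : Int) (low : String) (r : Int),
    (PySem.List.enumerate K s).findSome? (fun rk => if PySem.Str.isIn rk.2 low then some rk.1 else none) = some r →
    ∃ key, (r, key) ∈ PySem.List.enumerate K s ∧ PySem.Str.isIn key low = true := by
  induction K with
  | nil => simp [PySem.List.enumerate_nil]
  | cons key K' ih =>
    intro s low r h
    rw [PySem.List.enumerate_cons] at *
    rw [List.findSome?_cons] at h
    by_cases hk : PySem.Str.isIn key low = true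
    · simp only [hk, if_pos] at h
      obtain rfl : s = r := by simpa using h
      exact ⟨key, List.mem_cons_self, hk⟩
    · simp only [hk] at h
      obtain ⟨key', hmem, hin⟩ := ih (s + 1) low r (by simpa using h)
      exact ⟨key', List.mem_cons_of_mem _ hmem, hin⟩
theorem pvFs_first (K : List String) : ∀ (s : Int) (low : String) (j : Int) (key : String),
    (j, key) ∈ PySem.List.enumerate K s → PySem.Str.isIn key low = true →
    ∃ r, (PySem.List.enumerate K s).findSome? (fun rk => if PySem.Str.isIn rk.2 low then some rk.1 else none) = some r ∧ r ≤ j := by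
  induction K with
  | nil => simp [PySem.List.enumerate_nil]
  | cons k0 K' ih =>
    intro s low j key hmem hin
    have hj : s ≤ j := by
      rw [PySem.List.mem_enumerate_iff] at hmem
      obtain ⟨k, hk, hkj⟩ := hmem
      obtain ⟨h1, -⟩ : j = s + (k : Int) ∧ key = (k0 :: K')[k] := by simpa [Prod.ext_iff] using hkj
      omega
    rw [PySem.List.enumerate_cons]
    rw [List.findSome?_cons]
    by_cases hk : PySem.Str.isIn k0 low = true
    · simp only [PySem.Str.isIn_eq] at hk
      exact ⟨s, by simp [hk], hj⟩
    · simp only [hk, Bool.false_eq_true, if_false]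
      rw [PySem.List.enumerate_cons] at hmem
      rcases List.mem_cons.mp hmem with heq | hmem'
      · obtain ⟨-, h2⟩ : s = j ∧ k0 = key := by simpa [Prod.ext_iff] using heq.symm
        exact absurd (h2 ▸ hin) hk
      · exact ih (s + 1) low j key hmem' hin
theorem pvRank_sound (low : String) (r : Int) (h : pvRank low = some r) :
    ∃ key, (r, key) ∈ PySem.List.enumerate pvKeys 0 ∧ PySem.Str.isIn key low = true := by
  exact pvFs_sound pvKeys 0 low r h

theorem pvRank_nonneg (low : String) (r : Int) (h : pvRank low = some r) : 0 ≤ r := by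
  obtain ⟨key, hmem, -⟩ := pvRank_sound low r h
  rw [PySem.List.mem_enumerate_iff] at hmem
  obtain ⟨k, hk, hkj⟩ := hmem
  obtain ⟨h1, -⟩ : r = 0 + (k : Int) ∧ key = pvKeys[k] := by simpa [Prod.ext_iff] using hkj
  omega

theorem pvEC_get (cols : List String) (ic : Int × String) (h : ic ∈ pvEC cols) :
    PySem.List.pyGetD cols ic.1 "" = ic.2 := by
  rw [pvEC, PySem.List.mem_enumerate_iff] at h
  obtain ⟨k, hk, rfl⟩ := h
  simp [PySem.List.pyGetD_natCast, hk]

-- A normal form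
theorem pvInner_nf (key : String) (l : List (Int × String)) :
    ∀ cand, l.foldl (fun c ic => if pvMatch key ic && !c.contains ic.2 then c ++ [ic.2] else c) cand
      = pvDS cand ((l.filter (pvMatch key)).map (·.2)) := by
  induction l with
  | nil => intro cand; simp [pvDS]
  | cons ic l ih =>
    intro cand
    by_cases hm : pvMatch key ic = true
    · by_cases hc : cand.contains ic.2 = true
      · simp only [List.foldl_cons, List.filter_cons, hm, hc, if_pos, Bool.not_true,
          Bool.and_false, if_false, pvDS, List.map_cons, Bool.false_eq_true]
        simpa [pvDS, hc] using ih cand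
      · have hc' : cand.contains ic.2 = false := by simpa using hc
        simp only [List.foldl_cons, List.filter_cons, hm, hc', if_pos, Bool.not_false,
          Bool.and_true, pvDS, List.map_cons, Bool.false_eq_true, if_false]
        exact ih (cand ++ [ic.2])
    · have hm' : pvMatch key ic = false := by simpa using hm
      simp only [List.foldl_cons, List.filter_cons, hm', Bool.false_and, Bool.false_eq_true,
        if_false]
      exact ih cand

theorem pvA_nf (cols : List String) :
    guess_index_cols_py cols = (pvKeys.foldl (fun cand key => pvDS cand (pvSegA cols key)) []).take 3 := by
  have hF : ∀ (cand : List String) (key : String),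
      (PySem.List.enumerate (cols.map (fun c => PySem.Str.lower c))).foldl
        (fun candidates ic =>
          if PySem.Str.isIn key ic.2 && !(candidates.contains (PySem.List.pyGetD cols ic.1 "")) then
            candidates ++ [PySem.List.pyGetD cols ic.1 ""]
          else candidates) cand = pvDS cand (pvSegA cols key) := by
    intro cand key
    rw [pvEnum_map, List.foldl_map]
    have hcongr : (pvEC cols).foldl
        (fun candidates p =>
          if PySem.Str.isIn key (PySem.Str.lower p.2) && !(candidates.contains (PySem.List.pyGetD cols p.1 "")) then
            candidates ++ [PySem.List.pyGetD cols p.1 ""]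
          else candidates) cand
        = (pvEC cols).foldl (fun c ic => if pvMatch key ic && !c.contains ic.2 then c ++ [ic.2] else c) cand := by
      apply PySem.List.foldl_congr_mem
      intro acc x hx
      rw [pvEC_get cols x hx]
      rfl
    rw [show PySem.List.enumerate cols = pvEC cols from rfl, hcongr]
    simpa [pvSegA] using pvInner_nf key (pvEC cols) cand
  simp only [guess_index_cols_py]
  simp only [hF]

-- B normal form
theorem pvRecs_fold (cols : List String) :
    (PySem.List.enumerate cols).foldl (fun recs pc =>
      match pvRank (PySem.Str.lower pc.2) with
      | some r => recs ++ [(r, pc.1, pc.2)]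
      | none => recs) ([] : List (Int × Int × String)) = pvRecs cols := by
  have aux : ∀ (l : List (Int × String)) (acc : List (Int × Int × String)),
      l.foldl (fun recs pc => match pvRank (PySem.Str.lower pc.2) with
        | some r => recs ++ [(r, pc.1, pc.2)] | none => recs) acc = acc ++ l.filterMap pvToRec := by
    intro l
    induction l with
    | nil => simp
    | cons x xs ih =>
      intro acc
      cases h : pvRank (PySem.Str.lower x.2) <;> simp [pvToRec, h, ih]
  simpa [pvRecs, pvEC] using aux (PySem.List.enumerate cols) []

theorem pvB_nf (cols : List String) :
    guess_index_cols_py_alt cols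
      = (pvDS [] ((PySem.List.sorted2 (pvRecs cols) (fun t => t.1) (fun t => t.2.1)).map (·.2.2))).take 3 := by
  simp only [guess_index_cols_py_alt]
  rw [pvRecs_fold]
  rw [pvDS, List.foldl_map]

-- sorted2 characterization
theorem pvInsertBy_congr {α : Type} (b1 b2 : α → α → Bool) (x : α) : ∀ (acc : List α),
    (∀ y ∈ acc, b1 x y = b2 x y) → PySem.List.insertBy b1 x acc = PySem.List.insertBy b2 x acc := by
  intro acc
  induction acc with
  | nil => simp [PySem.List.insertBy]
  | cons y ys ih =>
    intro h
    simp only [PySem.List.insertBy]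
    rw [h y List.mem_cons_self]
    split
    · rfl
    · rw [ih (fun z hz => h z (List.mem_cons_of_mem _ hz))]
theorem pvFoldl_insertBy_congr {α : Type} (b1 b2 : α → α → Bool) : ∀ (xs acc : List α),
    (∀ x ∈ xs, ∀ y, (y ∈ acc ∨ y ∈ xs) → b1 x y = b2 x y) →
    xs.foldl (fun acc x => PySem.List.insertBy b1 x acc) acc
      = xs.foldl (fun acc x => PySem.List.insertBy b2 x acc) acc := by
  intro xs
  induction xs with
  | nil => simp
  | cons x xs ih =>
    intro acc h
    simp only [List.foldl_cons]
    rw [pvInsertBy_congr b1 b2 x acc (fun y hy => h x List.mem_cons_self y (Or.inl hy))]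
    apply ih
    intro z hz y hy
    apply h z (List.mem_cons_of_mem _ hz)
    rcases hy with hy | hy
    · rcases (PySem.List.mem_insertBy b2 x y acc).mp hy with rfl | hy
      · exact Or.inr List.mem_cons_self
      · exact Or.inl hy
    · exact Or.inr (List.mem_cons_of_mem _ hy)

theorem pvGroups_perm {α : Type} (f : α → Int) : ∀ (js : List Int) (l : List α),
    js.Nodup → (∀ t ∈ l, f t ∈ js) →
    (js.flatMap (fun j => l.filter (fun t => f t == j))).Perm l := by
  intro js
  induction js with
  | nil =>
    intro l _ hmem
    have : l = [] := List.eq_nil_iff_forall_not_mem.mpr (fun x hx => by simpa using hmem x hx)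
    simp [this]
  | cons j js ih =>
    intro l hnd hmem
    obtain ⟨hjn, hnd'⟩ := List.nodup_cons.mp hnd
    rw [List.flatMap_cons]
    have h1 : ∀ j' ∈ js, l.filter (fun t => f t == j')
        = (l.filter (fun t => !(f t == j))).filter (fun t => f t == j') := by
      intro j' hj'
      have hne : j' ≠ j := fun h => hjn (h ▸ hj')
      rw [List.filter_filter]
      apply List.filter_congr
      intro t ht
      by_cases hft : f t = j' <;> simp [hft, hne]
    rw [List.flatMap_congr h1]
    have hperm := ih (l.filter (fun t => !(f t == j))) hnd' (by
      intro t ht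
      have := List.of_mem_filter ht
      have hm := hmem t (List.mem_of_mem_filter ht)
      rcases List.mem_cons.mp hm with h | h
      · simp [h] at this
      · exact h)
    exact (hperm.append_left (l.filter (fun t => f t == j))).trans
      (List.filter_append_perm (fun t => f t == j) l)

theorem pvGroups_pairwise (l : List (Int × Int × String))
    (hl : l.Pairwise (fun a b => a.2.1 < b.2.1)) : ∀ (js : List (Int × String)),
    js.Pairwise (fun a b => a.1 < b.1) →
    (js.flatMap (fun jk => l.filter (fun t => t.1 == jk.1))).Pairwise
      (fun a b => a.1 < b.1 ∨ (a.1 = b.1 ∧ a.2.1 < b.2.1)) := by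
  intro js
  induction js with
  | nil => simp
  | cons jk js ih =>
    intro hjs
    obtain ⟨hhead, htail⟩ := List.pairwise_cons.mp hjs
    rw [List.flatMap_cons, List.pairwise_append]
    refine ⟨?_, ih htail, ?_⟩
    · apply List.Pairwise.imp_of_mem ?_ ((hl.filter _))
      intro a b ha hb hab
      right
      have ha' := List.of_mem_filter ha
      have hb' := List.of_mem_filter hb
      simp at ha' hb'
      exact ⟨by rw [ha', hb'], hab⟩
    · intro a ha b hb
      left
      have ha' := List.of_mem_filter ha
      obtain ⟨j'k', hj', hbmem⟩ := List.mem_flatMap.mp hb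
      have hb' := List.of_mem_filter hbmem
      simp at ha' hb'
      rw [ha', hb']
      exact hhead _ hj'

theorem pvLexKey (M ra pa rb pb : Int) (h1 : 0 ≤ pa) (h2 : pa < M) (h3 : 0 ≤ pb) (h4 : pb < M) :
    (decide (ra < rb) || (!decide (rb < ra) && decide (pa < pb)))
      = decide (ra * (M + 1) + pa < rb * (M + 1) + pb) := by
  by_cases hlt : ra < rb
  · have h : ra * (M + 1) + pa < rb * (M + 1) + pb := by nlinarith
    simp [hlt, h]
  · by_cases hgt : rb < ra
    · have h : ¬(ra * (M + 1) + pa < rb * (M + 1) + pb) := by nlinarith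
      simp [hlt, hgt, h]
    · have heq : ra = rb := le_antisymm (not_lt.mp hgt) (not_lt.mp hlt)
      subst heq
      by_cases hp : pa < pb <;> simp [hp]

theorem pvRecs_mem_enum (cols : List String) (t : Int × Int × String) (ht : t ∈ pvRecs cols) :
    (∃ key, ((t.1 : Int), key) ∈ PySem.List.enumerate pvKeys 0) ∧
      ∃ ic ∈ pvEC cols, pvRank (PySem.Str.lower ic.2) = some t.1 ∧ t = (t.1, ic.1, ic.2) := by
  rw [pvRecs] at ht
  obtain ⟨ic, hic, hrec⟩ := List.mem_filterMap.mp ht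
  rw [pvToRec] at hrec
  cases h : pvRank (PySem.Str.lower ic.2) with
  | none => rw [h] at hrec; simp at hrec
  | some r =>
    rw [h] at hrec
    simp only [Option.map_some, Option.some_inj] at hrec
    subst hrec
    obtain ⟨key, hmem, -⟩ := pvRank_sound _ _ h
    exact ⟨⟨key, hmem⟩, ic, hic, h, rfl⟩
theorem pvRecs_bounds (cols : List String) (t : Int × Int × String) (ht : t ∈ pvRecs cols) :
    0 ≤ t.1 ∧ t.1 < (pvKeys.length : Int) ∧ 0 ≤ t.2.1 ∧ t.2.1 < (cols.length : Int) := by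
  obtain ⟨⟨key, hmem⟩, ic, hic, -, hrec⟩ := pvRecs_mem_enum cols t ht
  rw [PySem.List.mem_enumerate_iff] at hmem
  obtain ⟨k, hk, hkj⟩ := hmem
  obtain ⟨h1, -⟩ : t.1 = 0 + (k : Int) ∧ key = pvKeys[k] := by simpa [Prod.ext_iff] using hkj
  rw [pvEC, PySem.List.mem_enumerate_iff] at hic
  obtain ⟨k', hk', rfl⟩ := hic
  have h2 : t.2.1 = 0 + (k' : Int) := by rw [hrec]
  refine ⟨by omega, by omega, by omega, by omega⟩

theorem pvRecs_pos_pairwise (cols : List String) :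
    (pvRecs cols).Pairwise (fun a b => a.2.1 < b.2.1) := by
  rw [pvRecs, pvEC]
  apply List.Pairwise.filterMap pvToRec ?_ (PySem.List.pairwise_lt_enumerate cols 0)
  intro a b hab c hc d hd
  simp only [pvToRec, Option.map_eq_some_iff] at hc hd
  obtain ⟨r, -, rfl⟩ := hc
  obtain ⟨r', -, rfl⟩ := hd
  exact hab

theorem pvPerm_groups (cols : List String) : (pvR cols).Perm (pvRecs cols) := by
  rw [pvR]
  have hrw : (PySem.List.enumerate pvKeys).flatMap (fun jk => (pvRecs cols).filter (fun t => t.1 == jk.1))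
      = ((PySem.List.enumerate pvKeys).map (fun p => p.1)).flatMap
          (fun j => (pvRecs cols).filter (fun t => t.1 == j)) := by
    rw [List.flatMap_map]
  rw [hrw]
  apply pvGroups_perm
  · exact (List.pairwise_map.mpr (PySem.List.pairwise_lt_enumerate pvKeys 0)).imp ne_of_lt
  · intro t ht
    obtain ⟨⟨key, hmem⟩, -⟩ := pvRecs_mem_enum cols t ht
    exact List.mem_map.mpr ⟨(t.1, key), hmem, rfl⟩

theorem pvR_pairwise (cols : List String) :
    (pvR cols).Pairwise (fun a b => a.1 < b.1 ∨ (a.1 = b.1 ∧ a.2.1 < b.2.1)) := by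
  exact pvGroups_pairwise (pvRecs cols) (pvRecs_pos_pairwise cols)
    (PySem.List.enumerate pvKeys) (PySem.List.pairwise_lt_enumerate pvKeys 0)

theorem pvSorted2_eq (cols : List String) :
    PySem.List.sorted2 (pvRecs cols) (fun t => t.1) (fun t => t.2.1) = pvR cols := by
  have h1 : PySem.List.sorted2 (pvRecs cols) (fun t => t.1) (fun t => t.2.1)
      = PySem.List.sorted (pvRecs cols)
          (fun t => t.1 * ((cols.length : Int) + 1) + t.2.1) := by
    rw [PySem.List.sorted_eq_foldl_insertBy]
    simp only [PySem.List.sorted2]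
    apply pvFoldl_insertBy_congr
    intro x hx y hy
    have hxm : x ∈ pvRecs cols := hx
    have hym : y ∈ pvRecs cols := by
      rcases hy with hy | hy
      · simp at hy
      · exact hy
    obtain ⟨-, -, hx3, hx4⟩ := pvRecs_bounds cols x hxm
    obtain ⟨-, -, hy3, hy4⟩ := pvRecs_bounds cols y hym
    exact pvLexKey (cols.length : Int) x.1 x.2.1 y.1 y.2.1 hx3 hx4 hy3 hy4
  rw [h1]
  apply PySem.List.sorted_eq_of_perm_of_pairwise_lt
  · exact pvPerm_groups cols
  · apply List.Pairwise.imp_of_mem ?_ (pvR_pairwise cols)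
    intro a b ha hb hab
    have haR : a ∈ pvRecs cols := (pvPerm_groups cols).mem_iff.mp ha
    have hbR : b ∈ pvRecs cols := (pvPerm_groups cols).mem_iff.mp hb
    obtain ⟨-, -, ha3, ha4⟩ := pvRecs_bounds cols a haR
    obtain ⟨-, -, hb3, hb4⟩ := pvRecs_bounds cols b hbR
    rcases hab with h | ⟨heq, hpos⟩
    · nlinarith
    · rw [heq]; omega

-- dS distributes over the grouped list
theorem pvDS_flatMap (js : List (Int × String)) (g : Int × String → List (Int × Int × String)) :
    ∀ cand, pvDS cand ((js.flatMap g).map (·.2.2)) = js.foldl (fun c jk => pvDS c ((g jk).map (·.2.2))) cand := by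
  induction js with
  | nil => intro cand; simp [pvDS]
  | cons jk js ih =>
    intro cand
    rw [List.flatMap_cons, List.map_append, pvDS_append, List.foldl_cons, ih]

theorem pvSegB_eq (cols : List String) (j : Int) :
    pvSegB cols j = ((pvEC cols).filter (fun ic => pvRank (PySem.Str.lower ic.2) == some j)).map (·.2) := by
  have aux : ∀ (l : List (Int × String)),
      ((l.filterMap pvToRec).filter (fun t => t.1 == j)).map (fun t => t.2.2)
        = (l.filter (fun ic => pvRank (PySem.Str.lower ic.2) == some j)).map (fun ic => ic.2) := by
    intro l
    induction l with
    | nil => simp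
    | cons ic l ih =>
      have hto : pvToRec ic = (pvRank (PySem.Str.lower ic.2)).map (fun r => (r, ic.1, ic.2)) := rfl
      cases h : pvRank (PySem.Str.lower ic.2) with
      | none => rw [List.filterMap_cons, hto, h]; simp [h, ih]
      | some r =>
        rw [List.filterMap_cons, hto, h]
        by_cases hr : r = j
        · subst hr; simp [h, ih]
        · simp [h, hr, ih]
  simpa [pvSegB, pvRecs] using aux (pvEC cols)

-- the main induction: processing the remaining keys, A's segments and B's segments dedup identically
theorem pvCore (cols : List String) : ∀ (K done : List String) (cand : List String),
    pvKeys = done ++ K →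
    (∀ ic ∈ pvEC cols, ∀ r, pvRank (PySem.Str.lower ic.2) = some r → r < (done.length : Int) →
      cand.contains ic.2 = true) →
    (PySem.List.enumerate K (done.length : Int)).foldl (fun c jk => pvDS c (pvSegA cols jk.2)) cand
      = (PySem.List.enumerate K (done.length : Int)).foldl (fun c jk => pvDS c (pvSegB cols jk.1)) cand := by
  intro K
  induction K with
  | nil => intro done cand _ _; simp [PySem.List.enumerate_nil]
  | cons key K' ih =>
    intro done cand hsplit hinv
    rw [PySem.List.enumerate_cons]
    simp only [List.foldl_cons]
    have hmemfull : ((done.length : Int), key) ∈ PySem.List.enumerate pvKeys 0 := by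
      rw [hsplit, PySem.List.enumerate_append, PySem.List.enumerate_cons]
      exact List.mem_append.mpr (Or.inr (by simp))
    -- a column whose first matching key is this one does match this key
    have hkeyOf : ∀ ic ∈ pvEC cols, pvRank (PySem.Str.lower ic.2) = some (done.length : Int) →
        pvMatch key ic = true := by
      intro ic _ hr
      obtain ⟨key', hmem', hin⟩ := pvRank_sound _ _ hr
      rw [pvEnum_fst_inj pvKeys 0 _ key' key hmem' hmemfull] at hin
      exact hin
    -- the two head segments dedup identically
    have hseg : pvDS cand (pvSegA cols key) = pvDS cand (pvSegB cols (done.length : Int)) := by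
      rw [pvSegB_eq]
      have hfe : (pvEC cols).filter (fun ic => pvRank (PySem.Str.lower ic.2) == some (done.length : Int))
          = ((pvEC cols).filter (pvMatch key)).filter
              (fun ic => pvRank (PySem.Str.lower ic.2) == some (done.length : Int)) := by
        rw [List.filter_filter]
        apply List.filter_congr
        intro ic hic
        by_cases hb : pvRank (PySem.Str.lower ic.2) = some (done.length : Int)
        · simp [hb, hkeyOf ic hic hb]
        · simp [hb]
      rw [hfe]
      rw [show pvSegA cols key = ((pvEC cols).filter (pvMatch key)).map (·.2) from rfl]
      apply pvDS_skip
      intro ic hic hp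
      have hicEC : ic ∈ pvEC cols := List.mem_of_mem_filter hic
      have hicM : pvMatch key ic = true := List.of_mem_filter hic
      obtain ⟨r, hr, hrle⟩ := pvFs_first pvKeys 0 (PySem.Str.lower ic.2) (done.length : Int) key hmemfull hicM
      have hrne : r ≠ (done.length : Int) := by
        intro hcontr
        rw [show pvRank (PySem.Str.lower ic.2) = some r from hr, hcontr] at hp
        simp at hp
      exact hinv ic hicEC r hr (by omega)
    rw [hseg]
    -- the processed prefix grows by one key
    have hlen : (done.length : Int) + 1 = (((done ++ [key]).length : Nat) : Int) := by
      simp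
    rw [hlen]
    apply ih (done ++ [key]) _ (by simpa using hsplit)
    intro ic hic r hr hrlt
    by_cases hrold : r < (done.length : Int)
    · exact pvDS_mono _ _ _ (hinv ic hic r hr hrold)
    · have hreq : r = (done.length : Int) := by
        simp only [List.length_append, List.length_cons, List.length_nil] at hrlt
        push_cast at hrlt
        omega
      apply pvDS_mem
      rw [pvSegB_eq]
      apply List.mem_map.mpr
      refine ⟨ic, List.mem_filter.mpr ⟨hic, by simp [hr, hreq]⟩, rfl⟩

-- ===== VERDICT (by name: the statement is the Claim_ definition above) =====
theorem guess_index_cols_py_spec : Claim_equal_guess_index_cols_py := by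
  intro cols _
  show guess_index_cols_py cols = guess_index_cols_py_alt cols
  rw [pvA_nf, pvB_nf, pvSorted2_eq]
  rw [pvR, pvDS_flatMap]
  have hB : ∀ (c : List String) (jk : Int × String),
      pvDS c (((pvRecs cols).filter (fun t => t.1 == jk.1)).map (fun t => t.2.2)) = pvDS c (pvSegB cols jk.1) := by
    intro c jk; rfl
  simp only [hB]
  conv_lhs => rw [← PySem.List.map_snd_enumerate pvKeys 0, List.foldl_map]
  congr 1
  have h0 : (0 : Int) = (([] : List String).length : Int) := by simp
  rw [h0]
  apply pvCore cols pvKeys [] []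
  · rfl
  · intro ic hic r hr hrlt
    have := pvRank_nonneg _ _ hr
    simp at hrlt
    omega
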